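-- pv_equiv track=rewrite | github.com/Diggleda/PeptideWebsitewithkinesiology | python_backend/services/discount_code_service.py | _is_role_allowed
-- ===== SOURCE A (Python) =====
-- from typing import Any, Dict, Optional
--
-- def _normalize_role(role: Optional[str]) -> str:
--     return str(role or "").strip().lower()
--
-- def _is_role_allowed(user_role: str, allowed_roles: list[Any]) -> bool:
--     normalized = _normalize_role(user_role)
--     if not normalized:
--         return False
--     allowed = {str(item or "").strip().lower() for item in (allowed_roles or []) if str(item or "").strip()}
--     if not allowed:
--         return False
--     if normalized in allowed:
--         return True
--     aliases = {
--         "saleslead": {"sales_lead", "sales-lead"},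
--         "sales_lead": {"saleslead", "sales-lead"},
--         "sales-lead": {"sales_lead", "saleslead"},
--         "sales_rep": {"rep"},
--         "rep": {"sales_rep"},
--     }
--     for alias in aliases.get(normalized, set()):
--         if alias in allowed:
--             return True
--     return False
-- ===== SOURCE B (Python) =====
-- _CANON = {"sales_lead": "saleslead", "sales-lead": "saleslead", "rep": "sales_rep"}
--
-- def _is_role_allowed(user_role, allowed_roles):
--     normalized = str(user_role or "").strip().lower()
--     if not normalized:
--         return False
--     allowed = [a for a in (str(item or "").strip().lower() for item in (allowed_roles or [])) if a]
--     if not allowed: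
--         return False
--     target = _CANON.get(normalized, normalized)
--     return any(_CANON.get(a, a) == target for a in allowed)
-- ===== Notes on version B (the rewrite author's own statement) =====
-- stated objective: simpler
-- what changed: Replaces the symmetric alias table plus the membership-then-alias-loop with a single canonical-form map (each alias group collapses to one representative) and one pass testing canon(a) == canon(normalized).
import Mathlib
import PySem

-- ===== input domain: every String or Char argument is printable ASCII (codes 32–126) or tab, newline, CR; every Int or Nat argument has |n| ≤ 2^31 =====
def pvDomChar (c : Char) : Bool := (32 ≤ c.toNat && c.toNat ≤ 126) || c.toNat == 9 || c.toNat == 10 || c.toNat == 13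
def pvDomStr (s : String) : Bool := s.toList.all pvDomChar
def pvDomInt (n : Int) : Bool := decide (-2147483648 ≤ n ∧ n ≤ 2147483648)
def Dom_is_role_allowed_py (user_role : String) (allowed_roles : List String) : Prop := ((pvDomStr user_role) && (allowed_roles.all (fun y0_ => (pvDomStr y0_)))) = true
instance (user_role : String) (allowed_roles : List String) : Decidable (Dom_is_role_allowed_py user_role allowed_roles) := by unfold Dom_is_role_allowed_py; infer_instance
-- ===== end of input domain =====

-- B replaces A's symmetric alias table and two membership passes by a canonical-form map
-- and a single any() pass; objective: simpler.

-- ===== PORT A =====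
-- str(role or "").strip().lower()  (role is a str here, so 'or ""' only affects the empty string, which it maps to itself)
def pvNorm (s : String) : String := PySem.Str.lower (PySem.Str.strip s)

-- the set literal values of A's 'aliases' dict, as lists (only existence in 'allowed' is consumed, so order is irrelevant)
def pvAliases (n : String) : List String :=
  if n = "saleslead" then ["sales_lead", "sales-lead"]
  else if n = "sales_lead" then ["saleslead", "sales-lead"]
  else if n = "sales-lead" then ["sales_lead", "saleslead"]
  else if n = "sales_rep" then ["rep"]
  else if n = "rep" then ["sales_rep"]
  else []

def is_role_allowed_py (user_role : String) (allowed_roles : List String) : Bool :=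
  let normalized := pvNorm user_role
  if normalized = "" then false
  else
    let allowed : PySem.Set String :=
      PySem.Set.ofList ((allowed_roles.filter (fun item => PySem.Str.strip item != "")).map pvNorm)
    if allowed = [] then false
    else if PySem.Set.contains allowed normalized then true
    else (pvAliases normalized).any (fun al => PySem.Set.contains allowed al)

-- ===== PORT B =====
-- _CANON.get(r, r)
def pvCanonTable : PySem.Dict String String :=
  PySem.Dict.ofList [("sales_lead", "saleslead"), ("sales-lead", "saleslead"), ("rep", "sales_rep")]

def pvCanon (r : String) : String := PySem.Dict.getD pvCanonTable r r

def is_role_allowed_py_alt (user_role : String) (allowed_roles : List String) : Bool :=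
  let normalized := pvNorm user_role
  if normalized = "" then false
  else
    let allowed := (allowed_roles.map pvNorm).filter (fun a => a != "")
    if allowed = [] then false
    else
      let target := pvCanon normalized
      allowed.any (fun a => pvCanon a == target)

-- ===== PRECONDITION & SPEC =====
def Spec_is_role_allowed_py (user_role : String) (allowed_roles : List String) (out : Bool) : Prop := out = is_role_allowed_py_alt user_role allowed_roles
instance (user_role : String) (allowed_roles : List String) (out : Bool) : Decidable (Spec_is_role_allowed_py user_role allowed_roles out) := by unfold Spec_is_role_allowed_py; infer_instance

-- ===== CLAIM (what is proved, stated in full; the proofs are below) =====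
def Claim_equal_is_role_allowed_py : Prop := ∀ (user_role : String) (allowed_roles : List String), Dom_is_role_allowed_py user_role allowed_roles → Spec_is_role_allowed_py user_role allowed_roles (is_role_allowed_py user_role allowed_roles)

-- ===== LEMMAS AND PROOFS =====

-- lower preserves emptiness, so filtering by strip-nonemptiness before normalizing (A)
-- equals filtering by nonemptiness after normalizing (B)
lemma pvNorm_eq_empty_iff (s : String) : pvNorm s = "" ↔ PySem.Str.strip s = "" := by
  unfold pvNorm
  constructor
  · intro h
    have h1 : (PySem.Str.lower (PySem.Str.strip s)).toList = [] := by rw [h]; rfl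
    rw [PySem.Str.toList_lower] at h1
    have : (PySem.Str.strip s).toList = [] := by
      cases hxs : (PySem.Str.strip s).toList with
      | nil => rfl
      | cons x xs => rw [hxs] at h1; simp [PySem.Chars.lower] at h1
    exact String.toList_eq_nil_iff.mp this
  · intro h; rw [h]; rfl

lemma filter_map_comm (roles : List String) :
    (roles.filter (fun item => PySem.Str.strip item != "")).map pvNorm
      = (roles.map pvNorm).filter (fun a => a != "") := by
  induction roles with
  | nil => rfl
  | cons r rs ih =>
    simp only [List.filter_cons, List.map_cons]
    by_cases h : PySem.Str.strip r = ""
    · have h2 : pvNorm r = "" := (pvNorm_eq_empty_iff r).mpr h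
      simp [h, h2, ih]
    · have h2 : pvNorm r ≠ "" := fun hc => h ((pvNorm_eq_empty_iff r).mp hc)
      simp [h, h2, ih]

-- the heart: a matches n directly or via the alias table iff they share a canonical form
lemma pvCanon_eq (r : String) :
    pvCanon r = if r = "sales_lead" then "saleslead"
      else if r = "sales-lead" then "saleslead"
      else if r = "rep" then "sales_rep" else r := by
  have htab : pvCanonTable
      = PySem.Dict.mk [("sales_lead", "saleslead"), ("sales-lead", "saleslead"), ("rep", "sales_rep")] := by
    decide
  unfold pvCanon
  rw [htab]
  by_cases h1 : r = "sales_lead"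
  · subst h1; decide
  · by_cases h2 : r = "sales-lead"
    · subst h2; decide
    · by_cases h3 : r = "rep"
      · subst h3; decide
      · simp only [h1, h2, h3, if_false]
        simp [PySem.Dict.getD, PySem.Dict.get?,
          Ne.symm h1, Ne.symm h2, Ne.symm h3]

lemma alias_iff_canon (a n : String) : (a = n ∨ a ∈ pvAliases n) ↔ pvCanon a = pvCanon n := by
  rw [pvCanon_eq, pvCanon_eq]
  unfold pvAliases
  split_ifs <;> simp_all [eq_comm]

lemma any_alias_eq (L : List String) (n : String) :
    ((L.contains n || (pvAliases n).any (fun al => L.contains al)))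
      = L.any (fun a => pvCanon a == pvCanon n) := by
  rw [Bool.eq_iff_iff]
  simp only [Bool.or_eq_true, List.any_eq_true, List.contains_iff_mem, beq_iff_eq]
  constructor
  · rintro (h | ⟨al, hal, h⟩)
    · exact ⟨n, h, rfl⟩
    · exact ⟨al, h, (alias_iff_canon al n).mp (Or.inr hal)⟩
  · rintro ⟨a, ha, hc⟩
    rcases (alias_iff_canon a n).mpr hc with rfl | hm
    · exact Or.inl ha
    · exact Or.inr ⟨a, hm, ha⟩

lemma ofList_eq_nil_iff (L : List String) : PySem.Set.ofList L = ([] : List String) ↔ L = [] := by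
  constructor
  · intro h
    cases L with
    | nil => rfl
    | cons x xs =>
      exfalso
      have : x ∈ PySem.Set.ofList (x :: xs) := by
        rw [PySem.Set.mem_ofList]; exact List.mem_cons_self
      rw [h] at this; exact absurd this (List.not_mem_nil)
  · intro h; rw [h]; rfl

lemma contains_ofList (L : List String) (x : String) :
    PySem.Set.contains (PySem.Set.ofList L) x = L.contains x := by
  simp [PySem.Set.mem_ofList]

-- ===== VERDICT (by name: the statement is the Claim_ definition above) =====
theorem is_role_allowed_py_spec : Claim_equal_is_role_allowed_py := by
  intro user_role allowed_roles _
  unfold Spec_is_role_allowed_py is_role_allowed_py is_role_allowed_py_alt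
  simp only
  by_cases hn : pvNorm user_role = ""
  · simp [hn]
  · simp only [hn, if_false]
    rw [← filter_map_comm]
    set L := (allowed_roles.filter (fun item => PySem.Str.strip item != "")).map pvNorm with hL
    by_cases hE : L = []
    · rw [hE]
      simp
    · have hS : ¬ PySem.Set.ofList L = [] := fun h => hE ((ofList_eq_nil_iff L).mp h)
      simp only [hS, hE, if_false]
      rw [contains_ofList]
      have key := any_alias_eq L (pvNorm user_role)
      cases hcn : L.contains (pvNorm user_role) with
      | true =>
        have hmem : pvNorm user_role ∈ L := by simpa using hcn
        simp only [hcn, if_true]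
        symm
        simp only [List.any_eq_true, beq_iff_eq]
        exact ⟨_, hmem, rfl⟩
      | false =>
        rw [hcn, Bool.false_or] at key
        simp only [hcn, Bool.false_eq_true, if_false]
        have hfun : (fun al => PySem.Set.contains (PySem.Set.ofList L) al)
            = (fun al => L.contains al) := funext (fun al => contains_ofList L al)
        rw [hfun, key]
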